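-- pv_equiv track=rewrite | github.com/seeker1729/DSA | stable_intervals.py | solution
-- ===== SOURCE A (Python) =====
-- def calculateStates(length):
--     count = 0
--     # possible stable states starting with first elemet (cur)
--     cur = length - 2
--     while cur:
--         count += cur
--         cur -= 1
--     return count
--
-- def solution(A):
--     # If the number of elements less than 3 -> no stable state
--     if len(A) < 3:
--         return 0
--     res = 0
--     # initial conditions
--     start, end = 0, 2
--     diff = A[1] - A[0]
--     cur = 1
--
--     while cur < len(A):
--         # if end within bound and next element can be included in the window then include it
--         if end < len(A) and A[end] - A[cur] == diff:
--             end += 1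
--             cur += 1
--         # otherwise process the current window and move to next one
--         else:
--             # find cur window length and find number of possible stable states in that
--             curWindowLength = end - start
--             if curWindowLength >= 3:
--                 res += calculateStates(curWindowLength)
--             # update the pointers to move to the next possible window
--             start = cur
--             if end < len(A) : diff = A[end] - A[cur]
--             cur += 1
--             end += 1
--
--     return res if res <  10 ** 9 else -1
-- ===== SOURCE B (Python) =====
-- def solution(A):
--     # single-pass arithmetic-slices DP: cur = slices ending at i
--     total = 0
--     cur = 0
--     for i in range(2, len(A)):
--         if A[i] - A[i-1] == A[i-1] - A[i-2]:
--             cur += 1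
--             total += cur
--         else:
--             cur = 0
--     return total if total < 10 ** 9 else -1
-- ===== Notes on version B (the rewrite author's own statement) =====
-- stated objective: simpler
-- what changed: Replaces the two-pointer maximal-window scan with a per-window triangular-sum helper by the classic single-pass arithmetic-slices DP that keeps a running count of arithmetic subarrays ending at the current index (fewer comparisons and no helper loop per window).
import Mathlib
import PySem

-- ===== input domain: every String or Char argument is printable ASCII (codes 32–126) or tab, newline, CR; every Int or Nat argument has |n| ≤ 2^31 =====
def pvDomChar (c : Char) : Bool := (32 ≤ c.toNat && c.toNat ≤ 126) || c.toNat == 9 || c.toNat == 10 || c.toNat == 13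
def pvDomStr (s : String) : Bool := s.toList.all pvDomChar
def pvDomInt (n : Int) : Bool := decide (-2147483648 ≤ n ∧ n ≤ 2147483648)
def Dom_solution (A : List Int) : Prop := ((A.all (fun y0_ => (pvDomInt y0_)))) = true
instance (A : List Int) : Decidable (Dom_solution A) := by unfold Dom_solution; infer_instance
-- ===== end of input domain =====

-- B replaces A's maximal-window scan (two pointers + per-window triangular sum) by the
-- single-pass arithmetic-slices DP (running count of slices ending at each index); objective: simpler.

-- ===== PORT A =====
-- Python's `while cur:` counts cur down from length-2 to 0; calculateStates is only
-- invoked with length ≥ 3, so `(length-2).toNat` is exact there (and for length = 2).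
def calcGo : Nat → Int → Int
  | 0, count => count
  | k+1, count => calcGo k (count + (k+1))

def calculateStates (length : Int) : Int := calcGo (length - 2).toNat 0

-- the while loop of A; all list accesses are guarded in range by the Python code,
-- so `pyGetD _ _ 0` is exact.
def solLoop (A : List Int) (n start endp diff cur res : Int) : Int :=
  if _h : cur < n then
    if endp < n ∧ PySem.List.pyGetD A endp 0 - PySem.List.pyGetD A cur 0 = diff then
      solLoop A n start (endp+1) diff (cur+1) res
    else
      let curWindowLength := endp - start
      let res' := if curWindowLength ≥ 3 then res + calculateStates curWindowLength else res
      let diff' := if endp < n then PySem.List.pyGetD A endp 0 - PySem.List.pyGetD A cur 0 else diff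
      solLoop A n cur (endp+1) diff' (cur+1) res'
  else res
termination_by (n - cur).toNat
decreasing_by all_goals omega

def solution (A : List Int) : Int :=
  let n : Int := A.length
  if n < 3 then 0
  else
    let diff := PySem.List.pyGetD A 1 0 - PySem.List.pyGetD A 0 0
    let res := solLoop A n 0 2 diff 1 0
    if res < 10^9 then res else -1

-- ===== PORT B =====
-- state is (total, cur)
def stepB (A : List Int) (st : Int × Int) (i : Int) : Int × Int :=
  if PySem.List.pyGetD A i 0 - PySem.List.pyGetD A (i-1) 0
      = PySem.List.pyGetD A (i-1) 0 - PySem.List.pyGetD A (i-2) 0 then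
    (st.1 + (st.2 + 1), st.2 + 1)
  else
    (st.1, 0)

def solution_alt (A : List Int) : Int :=
  let total := (List.foldl (stepB A) (0, 0) (PySem.List.pyRange 2 (A.length : Int) 1)).1
  if total < 10^9 then total else -1

-- ===== PRECONDITION & SPEC =====
def Spec_solution (A : List Int) (out : Int) : Prop := out = solution_alt A
instance (A : List Int) (out : Int) : Decidable (Spec_solution A out) := by unfold Spec_solution; infer_instance

-- ===== CLAIM (what is proved, stated in full; the proofs are below) =====
def Claim_equal_solution : Prop := ∀ (A : List Int), Dom_solution A → Spec_solution A (solution A)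

-- ===== LEMMAS AND PROOFS =====

lemma calcGo_shift (k : Nat) (a b : Int) : calcGo k (a + b) = calcGo k a + b := by
  induction k generalizing a b with
  | zero => rfl
  | succ m ih =>
    simp only [calcGo]
    rw [show a + b + (↑m + 1) = (a + (↑m + 1)) + b by ring, ih]

lemma calc_two : calculateStates 2 = 0 := by decide

lemma calc_succ (L : Int) (hL : 2 ≤ L) :
    calculateStates (L + 1) = calculateStates L + (L - 1) := by
  unfold calculateStates
  have h1 : (L + 1 - 2).toNat = (L - 2).toNat + 1 := by omega
  rw [h1]
  simp only [calcGo]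
  rw [show (0 : Int) + (((L - 2).toNat : Int) + 1) = 0 + (((L - 2).toNat : Int) + 1) from rfl]
  rw [calcGo_shift]
  omega

-- Main invariant: at the head of A's loop (end = cur+1, window [start, cur] arithmetic with
-- common difference diff), A's remaining run equals B's fold over the remaining indices
-- started from (res + triangular count of the open window, window length - 2).
lemma main_inv (A : List Int) (n : Int) :
    ∀ (fuel : Nat) (cur start diff res : Int),
      (n - cur).toNat = fuel →
      start + 1 ≤ cur → cur < n →
      (∀ i : Int, start ≤ i → i < cur →
        PySem.List.pyGetD A (i+1) 0 - PySem.List.pyGetD A i 0 = diff) →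
      solLoop A n start (cur+1) diff cur res =
        (List.foldl (stepB A)
          (res + calculateStates (cur + 1 - start), cur - 1 - start)
          (PySem.List.pyRange (cur+1) n 1)).1 := by
  intro fuel
  induction fuel with
  | zero => intro cur start diff res hf h1 h2 _; omega
  | succ k ih =>
    intro cur start diff res hf h1 h2 hw
    have hdiff : PySem.List.pyGetD A cur 0 - PySem.List.pyGetD A (cur-1) 0 = diff := by
      have := hw (cur - 1) (by omega) (by omega)
      simpa using this
    have e1 : cur + 1 - 1 = cur := by ring
    have e2 : cur + 1 - 2 = cur - 1 := by ring
    have hcond : (PySem.List.pyGetD A (cur+1) 0 - PySem.List.pyGetD A (cur+1-1) 0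
        = PySem.List.pyGetD A (cur+1-1) 0 - PySem.List.pyGetD A (cur+1-2) 0)
        ↔ PySem.List.pyGetD A (cur+1) 0 - PySem.List.pyGetD A cur 0 = diff := by
      rw [e1, e2, hdiff]
    have hclose : (if cur + 1 - start ≥ 3 then
          res + calculateStates (cur + 1 - start) else res) =
        res + calculateStates (cur + 1 - start) := by
      by_cases h3 : cur + 1 - start ≥ 3
      · rw [if_pos h3]
      · rw [if_neg h3]
        have h2' : cur + 1 - start = 2 := by omega
        rw [h2', calc_two]; ring
    rw [solLoop]
    rw [dif_pos h2]
    by_cases hend : cur + 1 < n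
    · rw [PySem.List.pyRange_one_cons hend]
      rw [List.foldl_cons]
      by_cases hm : PySem.List.pyGetD A (cur+1) 0 - PySem.List.pyGetD A cur 0 = diff
      · -- extend the window
        rw [if_pos ⟨hend, hm⟩]
        have hstep : stepB A (res + calculateStates (cur + 1 - start), cur - 1 - start) (cur+1)
            = (res + calculateStates (cur + 1 + 1 - start), cur + 1 - 1 - start) := by
          unfold stepB
          rw [if_pos (hcond.mpr hm)]
          have hcs := calc_succ (cur + 1 - start) (by omega)
          rw [show cur + 1 - start + 1 = cur + 1 + 1 - start by ring] at hcs
          rw [hcs]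
          simp only [Prod.mk.injEq]
          constructor <;> ring
        rw [hstep]
        exact ih (cur+1) start diff res (by omega) (by omega) hend
          (by
            intro i hi1 hi2
            by_cases hic : i < cur
            · exact hw i hi1 hic
            · have hieq : i = cur := by omega
              subst hieq; exact hm)
      · -- close the window, start a new one at cur
        rw [if_neg (by intro hc; exact hm hc.2)]
        simp only [if_pos hend, hclose]
        have hstep : stepB A (res + calculateStates (cur + 1 - start), cur - 1 - start) (cur+1)
            = (res + calculateStates (cur + 1 - start), 0) := by
          unfold stepB
          rw [if_neg (fun hc => hm (hcond.mp hc))]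
        rw [hstep]
        have := ih (cur+1) cur (PySem.List.pyGetD A (cur+1) 0 - PySem.List.pyGetD A cur 0)
            (res + calculateStates (cur + 1 - start)) (by omega) (by omega) hend
            (by
              intro i hi1 hi2
              have hieq : i = cur := by omega
              subst hieq; rfl)
        rw [this, show cur + 1 + 1 - cur = 2 by ring, calc_two,
          show cur + 1 - 1 - cur = 0 by ring]
        norm_num
    · -- cur + 1 = n : the loop closes the last window and ends
      rw [if_neg (by intro hc; exact hend hc.1)]
      simp only [if_neg hend, hclose]
      rw [PySem.List.pyRange_one_eq_nil (by omega), List.foldl_nil]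
      rw [solLoop, dif_neg hend]

-- ===== VERDICT (by name: the statement is the Claim_ definition above) =====
theorem solution_spec : Claim_equal_solution := by
  intro A _
  unfold Spec_solution
  simp only [solution, solution_alt]
  by_cases h3 : (A.length : Int) < 3
  · rw [if_pos h3, PySem.List.pyRange_one_eq_nil (by omega), List.foldl_nil]
    norm_num
  · rw [if_neg h3]
    have hmain := main_inv A (A.length : Int) (((A.length : Int) - 1).toNat) 1 0
      (PySem.List.pyGetD A 1 0 - PySem.List.pyGetD A 0 0) 0 rfl (by omega) (by omega)
      (by
        intro i hi1 hi2
        have hieq : i = 0 := by omega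
        subst hieq; norm_num)
    norm_num at hmain
    rw [calc_two] at hmain
    rw [hmain]
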